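-- pv_equiv track=rewrite | github.com/Sigmanificient/codewars | src/python/katas/py6kyu/help_the_bookseller.py | stock_list
-- ===== SOURCE A (Python) =====
-- def stock_list(list_of_art, list_of_cat):
--     if not list_of_cat or not list_of_art:
--         return ''
--
--     data = {k: 0 for k in list_of_cat}
--
--     for art in list_of_art:
--         k = art[0]
--         if k in data:
--             data[k] += int(art.split()[1])
--
--     return " - ".join(f"({k} : {v})" for k, v in data.items())
-- ===== SOURCE B (Python) =====
-- def stock_list(list_of_art, list_of_cat):
--     if not list_of_cat or not list_of_art:
--         return ''
--
--     return " - ".join(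
--         f"({k} : {sum(int(a.split()[1]) for a in list_of_art if a[0] == k)})"
--         for k in dict.fromkeys(list_of_cat)
--     )
-- ===== Notes on version B (the rewrite author's own statement) =====
-- stated objective: simpler
-- what changed: Replaces the mutable bucketing dict (init-to-zero pass plus in-place increment pass) with a single join over the dedup'd categories, each total computed by a direct scan of the articles.
import Mathlib
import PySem

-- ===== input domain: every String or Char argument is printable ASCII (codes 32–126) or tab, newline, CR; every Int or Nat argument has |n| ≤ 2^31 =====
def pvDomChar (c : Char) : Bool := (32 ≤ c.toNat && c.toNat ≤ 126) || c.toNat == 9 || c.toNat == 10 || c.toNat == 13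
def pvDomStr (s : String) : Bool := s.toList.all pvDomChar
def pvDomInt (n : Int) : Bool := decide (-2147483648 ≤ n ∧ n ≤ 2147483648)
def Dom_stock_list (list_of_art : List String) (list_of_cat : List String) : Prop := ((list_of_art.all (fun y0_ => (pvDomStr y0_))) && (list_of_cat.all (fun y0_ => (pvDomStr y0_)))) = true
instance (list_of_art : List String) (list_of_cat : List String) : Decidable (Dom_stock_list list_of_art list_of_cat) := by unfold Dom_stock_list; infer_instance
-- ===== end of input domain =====

-- B replaces A's mutable bucketing dict (zero-init pass + in-place increments) by a
-- direct join over the dedup'd categories, each total computed by scanning the articles;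
-- objective: simpler (no speed claim). Return value only; neither version mutates its arguments.

-- ===== PORT A =====
-- art[0] as a 1-character string (both Pythons evaluate exactly this expression)
def pvKey (a : String) : String := ((PySem.Str.pyGet? a 0).map (fun c => String.mk [c])).getD ""
-- int(art.split()[1]) (both Pythons evaluate exactly this expression on matching articles)
def pvAmt (a : String) : Int :=
  (PySem.Int.ofStr? ((PySem.List.pyGet? (PySem.Str.split₀ a) 1).getD "")).getD 0

def stock_list (list_of_art : List String) (list_of_cat : List String) : String :=
  if list_of_cat = [] ∨ list_of_art = [] then "" else
    PySem.Str.join " - "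
      (((list_of_art.foldl (fun d a =>
          if d.contains (pvKey a) then d.modify (pvKey a) 0 (· + pvAmt a) else d)
         (list_of_cat.foldl (fun d k => d.insert k 0) PySem.Dict.empty)).items).map
        (fun p => "(" ++ p.1 ++ " : " ++ PySem.Int.toStr p.2 ++ ")"))

-- ===== PORT B =====
def stock_list_alt (list_of_art : List String) (list_of_cat : List String) : String :=
  if list_of_cat = [] ∨ list_of_art = [] then "" else
    PySem.Str.join " - "
      ((PySem.List.dedup list_of_cat).map (fun k =>
        "(" ++ k ++ " : " ++
          PySem.Int.toStr
            (list_of_art.foldl (fun s a => if pvKey a = k then s + pvAmt a else s) 0)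
          ++ ")"))

-- ===== PRECONDITION & SPEC =====
-- Pre_ excludes exactly the inputs where Python A raises: with both lists nonempty, an
-- empty article (IndexError on art[0]) or a matching article whose split has no second
-- word (IndexError) or whose second word int() rejects (ValueError).
def Pre_stock_list (list_of_art : List String) (list_of_cat : List String) : Prop :=
  list_of_cat = [] ∨ list_of_art = [] ∨
    ∀ a ∈ list_of_art, a.toList ≠ [] ∧
      (String.mk [a.toList.headD ' '] ∈ list_of_cat →
        (PySem.Int.ofStr? ((PySem.Str.split₀ a).getD 1 "")).isSome)
instance (list_of_art : List String) (list_of_cat : List String) : Decidable (Pre_stock_list list_of_art list_of_cat) := by unfold Pre_stock_list; infer_instance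

def pvWitness_stock_list : List String × List String := (["ABAR 200", "CDXE 500", "BKWR 250"], ["A", "B"])

def Spec_stock_list (list_of_art : List String) (list_of_cat : List String) (out : String) : Prop := out = stock_list_alt list_of_art list_of_cat
instance (list_of_art : List String) (list_of_cat : List String) (out : String) : Decidable (Spec_stock_list list_of_art list_of_cat out) := by unfold Spec_stock_list; infer_instance

-- ===== CLAIM (what is proved, stated in full; the proofs are below) =====
def Claim_equal_stock_list : Prop := ∀ (list_of_art : List String) (list_of_cat : List String), Dom_stock_list list_of_art list_of_cat → Pre_stock_list list_of_art list_of_cat → Spec_stock_list list_of_art list_of_cat (stock_list list_of_art list_of_cat)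

-- ===== LEMMAS AND PROOFS =====

-- the zero-init loop: every key reads 0
theorem getD_init_zero (cats : List String) (d : PySem.Dict String Int)
    (h : ∀ k, d.getD k 0 = 0) (k : String) :
    (cats.foldl (fun d k => d.insert k 0) d).getD k 0 = 0 := by
  induction cats generalizing d with
  | nil => exact h k
  | cons c cs ih =>
      simp only [List.foldl_cons]
      exact ih _ (fun j => by rw [PySem.Dict.getD_insert]; split <;> simp [h])

-- the article loop preserves the key list
theorem keys_art_loop (arts : List String) (d : PySem.Dict String Int) :
    (arts.foldl (fun d a =>
      if d.contains (pvKey a) then d.modify (pvKey a) 0 (· + pvAmt a) else d) d).keys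
      = d.keys := by
  induction arts generalizing d with
  | nil => rfl
  | cons a as ih =>
      simp only [List.foldl_cons]
      split
      · rename_i hc
        rw [ih]
        simp [PySem.Dict.keys_modify, PySem.Dict.keys_insert_of_contains, hc]
      · exact ih d

-- the article loop: value at a present key accumulates the matching amounts
theorem getD_art_loop (arts : List String) (d : PySem.Dict String Int) (k : String)
    (hk : d.contains k = true) :
    (arts.foldl (fun d a =>
      if d.contains (pvKey a) then d.modify (pvKey a) 0 (· + pvAmt a) else d) d).getD k 0
      = arts.foldl (fun s a => if pvKey a = k then s + pvAmt a else s) (d.getD k 0) := by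
  induction arts generalizing d with
  | nil => rfl
  | cons a as ih =>
      simp only [List.foldl_cons]
      by_cases hc : d.contains (pvKey a) = true
      · rw [if_pos hc, ih _ (by rw [PySem.Dict.contains_modify]; simp [hk])]
        congr 1
        rw [PySem.Dict.getD_modify]
        by_cases hek : pvKey a = k
        · subst hek; rw [if_pos rfl]
        · rw [if_neg (fun h => hek h.symm), if_neg hek]
      · rw [if_neg hc, ih _ hk]
        have hek : pvKey a ≠ k := fun h => hc (h ▸ hk)
        rw [if_neg hek]

-- ===== VERDICT (by name: the statement is the Claim_ definition above) =====
theorem stock_list_spec : Claim_equal_stock_list := by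
  intro arts cats _ _
  unfold Spec_stock_list stock_list stock_list_alt
  by_cases hguard : cats = [] ∨ arts = []
  · simp [hguard]
  · rw [if_neg hguard, if_neg hguard]
    set d0 : PySem.Dict String Int :=
      cats.foldl (fun d k => d.insert k 0) PySem.Dict.empty with hd0
    set step := fun (d : PySem.Dict String Int) (a : String) =>
      if d.contains (pvKey a) then d.modify (pvKey a) 0 (· + pvAmt a) else d with hstep
    have hkeys0 : d0.keys = PySem.List.dedup cats := by
      rw [hd0, PySem.Dict.keys_foldl_insert]
      simp [PySem.Dict.keys_empty, PySem.List.dedup_eq_ofList]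
      rfl
    have hnd0 : d0.keys.Nodup := by
      rw [hd0]; exact PySem.Dict.nodup_keys_foldl_insert _ _ _ PySem.Dict.nodup_keys_empty
    have hkeys : (arts.foldl step d0).keys = PySem.List.dedup cats := by
      rw [hstep, keys_art_loop, hkeys0]
    have hnd : (arts.foldl step d0).keys.Nodup := by rw [hkeys, ← hkeys0]; exact hnd0
    rw [PySem.Dict.items_eq_map_keys _ hnd 0, hkeys, List.map_map]
    congr 1
    apply List.map_congr_left
    intro k hkmem
    have hk0 : d0.contains k = true := by
      rw [PySem.Dict.contains_iff_mem_keys, hkeys0]; exact hkmem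
    have := getD_art_loop arts d0 k hk0
    rw [hstep]
    simp only [Function.comp]
    rw [this, getD_init_zero cats _ (fun j => PySem.Dict.getD_empty _ _) k]
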